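-- pv_equiv track=rewrite | github.com/svalleco/attract_grid_data_flow_optimization | agent_utils.py | get_all_possible_configurations
-- ===== SOURCE A (Python) =====
-- def get_all_possible_configurations(acc, i, q_count, qubits_domain):
-- 	'''
-- 	Returns all possible configurations as a tuple of tuples of length
-- 	q_count.
--
-- 	acc
-- 		Accumulator
--
-- 	i
-- 		Current qubit index. Starts at 0.
--
-- 	q_count
-- 		Number of qubits
--
-- 	qubits_domain
-- 		An iterable of length 2 (e.g. (0,1,) or (-1,+1,))
-- 	'''
-- 	if i == q_count - 1:
-- 		return\
-- 			(\
-- 				acc + (qubits_domain[0],),\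
-- 				acc + (qubits_domain[1],),\
-- 			)
-- 	return\
-- 		get_all_possible_configurations(\
-- 			acc + ( qubits_domain[0] , ) , i + 1 , q_count , qubits_domain )\
-- 		+ get_all_possible_configurations(\
-- 			acc + ( qubits_domain[1] , ) , i + 1 , q_count , qubits_domain )
-- ===== SOURCE B (Python) =====
-- def get_all_possible_configurations(acc, i, q_count, qubits_domain):
-- 	'''
-- 	Returns all possible configurations as a tuple of tuples of length
-- 	q_count: acc extended by every combination of q_count - i domain
-- 	values, built iteratively level by level (domain[0]-first order).
-- 	'''
-- 	d0, d1 = qubits_domain[0], qubits_domain[1]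
-- 	configs = [acc]
-- 	for _ in range(q_count - i):
-- 		configs = [t + (d,) for t in configs for d in (d0, d1)]
-- 	return tuple(configs)
-- ===== Notes on version B (the rewrite author's own statement) =====
-- stated objective: alternative
-- what changed: Replaces A's binary tree recursion (two recursive calls per level, concatenated) by an iterative level-by-level expansion: keep a list of partial tuples and, q_count - i times, extend each by domain[0] then domain[1].
import Mathlib
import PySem

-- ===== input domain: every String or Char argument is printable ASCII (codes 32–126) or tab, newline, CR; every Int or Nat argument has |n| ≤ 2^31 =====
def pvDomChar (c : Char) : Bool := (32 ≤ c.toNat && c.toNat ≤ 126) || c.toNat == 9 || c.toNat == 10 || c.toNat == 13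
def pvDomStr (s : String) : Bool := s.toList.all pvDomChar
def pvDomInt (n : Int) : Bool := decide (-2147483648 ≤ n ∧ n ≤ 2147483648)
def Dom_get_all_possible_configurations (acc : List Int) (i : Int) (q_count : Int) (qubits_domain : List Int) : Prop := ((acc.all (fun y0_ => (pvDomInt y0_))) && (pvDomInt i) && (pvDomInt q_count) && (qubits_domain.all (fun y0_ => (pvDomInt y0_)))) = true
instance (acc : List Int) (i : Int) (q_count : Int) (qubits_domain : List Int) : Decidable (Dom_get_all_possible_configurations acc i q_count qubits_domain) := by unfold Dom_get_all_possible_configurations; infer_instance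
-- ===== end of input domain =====

-- ===== PORT A =====
-- B builds the same configurations iteratively level by level instead of A's binary recursion; same cost (objective: alternative).
-- Port of A. A's Python recursion never terminates when i >= q_count (missing base case,
-- RecursionError); those inputs are excluded by Pre_ below, and the final `[]` branch is
-- only a totality guard for them, never reached inside Pre_.
def get_all_possible_configurations (acc : List Int) (i : Int) (q_count : Int) (qubits_domain : List Int) : List (List Int) :=
  if i = q_count - 1 then
    [acc ++ [PySem.List.pyGetD qubits_domain 0 0], acc ++ [PySem.List.pyGetD qubits_domain 1 0]]
  else if i < q_count - 1 then
    get_all_possible_configurations (acc ++ [PySem.List.pyGetD qubits_domain 0 0]) (i + 1) q_count qubits_domain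
    ++ get_all_possible_configurations (acc ++ [PySem.List.pyGetD qubits_domain 1 0]) (i + 1) q_count qubits_domain
  else []
termination_by (q_count - i).toNat
decreasing_by all_goals omega

-- ===== PORT B =====
def get_all_possible_configurations_alt (acc : List Int) (i : Int) (q_count : Int) (qubits_domain : List Int) : List (List Int) :=
  let d0 := PySem.List.pyGetD qubits_domain 0 0
  let d1 := PySem.List.pyGetD qubits_domain 1 0
  (List.range (q_count - i).toNat).foldl
    (fun configs _ => configs.flatMap (fun t => [t ++ [d0], t ++ [d1]]))
    [acc]

-- ===== PRECONDITION & SPEC =====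
-- Pre_ excludes exactly the inputs where the Python A raises: i >= q_count (unbounded
-- recursion, RecursionError) or a domain shorter than 2 (IndexError).
def Pre_get_all_possible_configurations (acc : List Int) (i : Int) (q_count : Int) (qubits_domain : List Int) : Prop :=
  i < q_count ∧ 2 ≤ qubits_domain.length
instance (acc : List Int) (i : Int) (q_count : Int) (qubits_domain : List Int) : Decidable (Pre_get_all_possible_configurations acc i q_count qubits_domain) := by unfold Pre_get_all_possible_configurations; infer_instance
def pvWitness_get_all_possible_configurations : List Int × Int × Int × List Int := ([5], 1, 3, [0, 1])

def Spec_get_all_possible_configurations (acc : List Int) (i : Int) (q_count : Int) (qubits_domain : List Int) (out : List (List Int)) : Prop := out = get_all_possible_configurations_alt acc i q_count qubits_domain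
instance (acc : List Int) (i : Int) (q_count : Int) (qubits_domain : List Int) (out : List (List Int)) : Decidable (Spec_get_all_possible_configurations acc i q_count qubits_domain out) := by unfold Spec_get_all_possible_configurations; infer_instance

-- ===== CLAIM (what is proved, stated in full; the proofs are below) =====
def Claim_equal_get_all_possible_configurations : Prop := ∀ (acc : List Int) (i : Int) (q_count : Int) (qubits_domain : List Int), Dom_get_all_possible_configurations acc i q_count qubits_domain → Pre_get_all_possible_configurations acc i q_count qubits_domain → Spec_get_all_possible_configurations acc i q_count qubits_domain (get_all_possible_configurations acc i q_count qubits_domain)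

-- ===== LEMMAS AND PROOFS =====

-- one expansion level of B
def pvStep (d0 d1 : Int) (cs : List (List Int)) : List (List Int) :=
  cs.flatMap (fun t => [t ++ [d0], t ++ [d1]])

-- n expansion levels, peeling from the front
def pvIter (d0 d1 : Int) : Nat → List (List Int) → List (List Int)
  | 0, cs => cs
  | n + 1, cs => pvIter d0 d1 n (pvStep d0 d1 cs)

lemma pvIter_step (d0 d1 : Int) (n : Nat) (cs : List (List Int)) :
    pvIter d0 d1 n (pvStep d0 d1 cs) = pvStep d0 d1 (pvIter d0 d1 n cs) := by
  induction n generalizing cs with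
  | zero => rfl
  | succ n ih => simp [pvIter, ih]

lemma pvFoldl_eq_pvIter (d0 d1 : Int) (n : Nat) (cs : List (List Int)) :
    (List.range n).foldl (fun configs _ => configs.flatMap (fun t => [t ++ [d0], t ++ [d1]])) cs
      = pvIter d0 d1 n cs := by
  induction n generalizing cs with
  | zero => rfl
  | succ n ih =>
    rw [List.range_succ, List.foldl_append, ih]
    exact (pvIter_step d0 d1 n cs).symm

lemma pvIter_append (d0 d1 : Int) (n : Nat) (xs ys : List (List Int)) :
    pvIter d0 d1 n (xs ++ ys) = pvIter d0 d1 n xs ++ pvIter d0 d1 n ys := by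
  induction n generalizing xs ys with
  | zero => rfl
  | succ n ih => simp [pvIter, pvStep, ih]

lemma pvA_eq_pvIter (q_count : Int) (qubits_domain : List Int) (n : Nat) :
    ∀ (acc : List Int) (i : Int), i < q_count → (q_count - 1 - i).toNat = n →
    get_all_possible_configurations acc i q_count qubits_domain
      = pvIter (PySem.List.pyGetD qubits_domain 0 0) (PySem.List.pyGetD qubits_domain 1 0) (n + 1) [acc] := by
  induction n with
  | zero =>
    intro acc i hi hn
    have hi' : i = q_count - 1 := by omega
    rw [get_all_possible_configurations]
    simp [hi', pvIter, pvStep]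
  | succ n ih =>
    intro acc i hi hn
    have h1 : i ≠ q_count - 1 := by omega
    have h2 : i < q_count - 1 := by omega
    rw [get_all_possible_configurations]
    simp only [h1, if_false, h2, if_pos]
    rw [ih _ (i + 1) (by omega) (by omega), ih _ (i + 1) (by omega) (by omega)]
    show _ = pvIter _ _ (n + 1) (pvStep _ _ [acc])
    have : pvStep (PySem.List.pyGetD qubits_domain 0 0) (PySem.List.pyGetD qubits_domain 1 0) [acc]
        = [acc ++ [PySem.List.pyGetD qubits_domain 0 0]] ++ [acc ++ [PySem.List.pyGetD qubits_domain 1 0]] := by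
      simp [pvStep]
    rw [this, pvIter_append]

-- ===== VERDICT (by name: the statement is the Claim_ definition above) =====
theorem get_all_possible_configurations_spec : Claim_equal_get_all_possible_configurations := by
  intro acc i q_count qubits_domain _ hpre
  obtain ⟨hi, -⟩ := hpre
  unfold Spec_get_all_possible_configurations get_all_possible_configurations_alt
  rw [pvFoldl_eq_pvIter]
  have hn : (q_count - i).toNat = (q_count - 1 - i).toNat + 1 := by omega
  rw [hn]
  exact pvA_eq_pvIter q_count qubits_domain _ acc i hi rfl
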